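-- pv_equiv track=rewrite | github.com/travisoneill/project-euler | 090.py | check_squares
-- ===== SOURCE A (Python) =====
-- def check(n, die1, die2):
--     '''Checks if 2 digit number n can be formed by 2 dice'''
--     d2 = n % 10
--     d1 = n // 10
--     if d2 in die2 and d1 in die1:
--         return True
--     if d1 in die2 and d2 in die1:
--         return True
--     return False
--
-- def check_squares(die1, die2):
--     '''Returns true if all 2 digit squares can be formed by two dice'''
--     for n in (0, 1, 2, 3, 4, 5, 6, 8):
--         if n not in die1 and n not in die2:
--             return False
--     for i in (1, 4, 9, 16, 25, 36, 49, 64, 81):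
--         if not check(i, die1, die2):
--             return False
--     return True
-- ===== SOURCE B (Python) =====
-- def check_squares(die1, die2):
--     '''Returns true if all 2 digit squares can be formed by two dice'''
--     digits = set(range(10))
--     d1s = set(die1) & digits   # only digit faces can ever form a two-digit square
--     d2s = set(die2) & digits
--     pairs = set()
--     for a in d1s:
--         for b in d2s:
--             pairs.add((a, b))
--             pairs.add((b, a))
--     if not {0, 1, 2, 3, 4, 5, 6, 8} <= (d1s | d2s):
--         return False
--     return all(divmod(sq, 10) in pairs for sq in (1, 4, 9, 16, 25, 36, 49, 64, 81))
-- ===== Notes on version B (the rewrite author's own statement) =====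
-- stated objective: alternative
-- what changed: B intersects each die with the digit range, precomputes one cross-product set of ordered (face, face) pairs plus the digit-union set, then answers by a subset test and membership of each square's divmod pair, instead of A's per-square two-way `check` scans over both dice lists.
import Mathlib
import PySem

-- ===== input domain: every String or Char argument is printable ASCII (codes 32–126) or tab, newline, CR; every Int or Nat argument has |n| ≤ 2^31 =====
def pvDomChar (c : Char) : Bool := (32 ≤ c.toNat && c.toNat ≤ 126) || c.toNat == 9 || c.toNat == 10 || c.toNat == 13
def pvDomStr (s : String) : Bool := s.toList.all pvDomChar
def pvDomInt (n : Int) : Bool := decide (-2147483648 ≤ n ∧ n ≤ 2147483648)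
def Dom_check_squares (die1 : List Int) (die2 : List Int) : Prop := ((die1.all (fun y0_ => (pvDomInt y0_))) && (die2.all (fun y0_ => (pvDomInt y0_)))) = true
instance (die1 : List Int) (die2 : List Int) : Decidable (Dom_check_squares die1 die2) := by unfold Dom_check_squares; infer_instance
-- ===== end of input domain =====

-- B replaces A's per-square two-way `check` calls by one precomputed cross-product
-- set of orderable (face, face) pairs plus a digit-subset test (objective: alternative).

-- ===== PORT A =====
-- port of `check(n, die1, die2)`
def check (n : Int) (die1 : List Int) (die2 : List Int) : Bool :=
  let d2 := PySem.Int.mod n 10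
  let d1 := PySem.Int.floordiv n 10
  if die2.contains d2 && die1.contains d1 then true
  else if die2.contains d1 && die1.contains d2 then true
  else false

-- the two early-return loops become `List.all` over the same tuples, in order
def check_squares (die1 : List Int) (die2 : List Int) : Bool :=
  if ([0, 1, 2, 3, 4, 5, 6, 8] : List Int).all
      (fun n => !(!die1.contains n && !die2.contains n)) then
    ([1, 4, 9, 16, 25, 36, 49, 64, 81] : List Int).all (fun i => check i die1 die2)
  else false

-- ===== PORT B =====
def check_squares_alt (die1 : List Int) (die2 : List Int) : Bool :=
  -- digits = set(range(10))
  let digits : PySem.Set Int := PySem.Set.ofList (PySem.List.pyRange 0 10 1)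
  -- d1s = set(die1) & digits; d2s = set(die2) & digits
  let d1s : PySem.Set Int := PySem.Set.inter (PySem.Set.ofList die1) digits
  let d2s : PySem.Set Int := PySem.Set.inter (PySem.Set.ofList die2) digits
  -- pairs = set(); for a in d1s: for b in d2s: pairs.add((a,b)); pairs.add((b,a))
  let pairs : PySem.Set (Int × Int) :=
    d1s.foldl (fun s a =>
      d2s.foldl (fun s b => PySem.Set.add (PySem.Set.add s (a, b)) (b, a)) s)
      PySem.Set.empty
  if !(PySem.Set.issubset (PySem.Set.ofList ([0, 1, 2, 3, 4, 5, 6, 8] : List Int))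
        (PySem.Set.union d1s d2s)) then
    false
  else
    -- divmod(sq, 10) = (sq // 10, sq % 10); divisor is the nonzero literal 10, exact
    ([1, 4, 9, 16, 25, 36, 49, 64, 81] : List Int).all
      (fun sq => PySem.Set.contains pairs (PySem.Int.floordiv sq 10, PySem.Int.mod sq 10))

-- ===== PRECONDITION & SPEC =====
def Spec_check_squares (die1 : List Int) (die2 : List Int) (out : Bool) : Prop := out = check_squares_alt die1 die2
instance (die1 : List Int) (die2 : List Int) (out : Bool) : Decidable (Spec_check_squares die1 die2 out) := by unfold Spec_check_squares; infer_instance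

-- ===== CLAIM (what is proved, stated in full; the proofs are below) =====
def Claim_equal_check_squares : Prop := ∀ (die1 : List Int) (die2 : List Int), Dom_check_squares die1 die2 → Spec_check_squares die1 die2 (check_squares die1 die2)

-- ===== LEMMAS AND PROOFS =====

-- membership in the inner-loop accumulation over d2s
theorem mem_inner (d2s : List Int) (a x y : Int) (s : PySem.Set (Int × Int)) :
    (x, y) ∈ d2s.foldl (fun s b => PySem.Set.add (PySem.Set.add s (a, b)) (b, a)) s ↔
      (x, y) ∈ s ∨ (x = a ∧ y ∈ d2s) ∨ (y = a ∧ x ∈ d2s) := by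
  induction d2s generalizing s with
  | nil => simp
  | cons b t ih =>
    simp only [List.foldl_cons, ih, PySem.Set.mem_add, List.mem_cons, Prod.mk.injEq]
    tauto

-- membership in the full cross-product pairs set
theorem mem_pairs (d1s d2s : List Int) (x y : Int) :
    (x, y) ∈ d1s.foldl (fun s a =>
        d2s.foldl (fun s b => PySem.Set.add (PySem.Set.add s (a, b)) (b, a)) s)
        PySem.Set.empty ↔
      (x ∈ d1s ∧ y ∈ d2s) ∨ (y ∈ d1s ∧ x ∈ d2s) := by
  suffices h : ∀ s : PySem.Set (Int × Int),
      (x, y) ∈ d1s.foldl (fun s a =>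
        d2s.foldl (fun s b => PySem.Set.add (PySem.Set.add s (a, b)) (b, a)) s) s ↔
      (x, y) ∈ s ∨ (x ∈ d1s ∧ y ∈ d2s) ∨ (y ∈ d1s ∧ x ∈ d2s) by
    simpa [PySem.Set.empty] using h PySem.Set.empty
  induction d1s with
  | nil => simp
  | cons a t ih =>
    intro s
    simp only [List.foldl_cons, ih, mem_inner, List.mem_cons]
    tauto

-- A's `check n` agrees with membership of (n // 10, n % 10) in B's pairs set,
-- provided both digits of n lie in the retained digit range
theorem check_eq_pairs (die1 die2 : List Int) (n : Int)
    (h1 : PySem.Int.floordiv n 10 ∈ PySem.List.pyRange 0 10 1)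
    (h2 : PySem.Int.mod n 10 ∈ PySem.List.pyRange 0 10 1) :
    check n die1 die2 =
      PySem.Set.contains
        ((PySem.Set.inter (PySem.Set.ofList die1) (PySem.Set.ofList (PySem.List.pyRange 0 10 1))).foldl
          (fun s a =>
            (PySem.Set.inter (PySem.Set.ofList die2) (PySem.Set.ofList (PySem.List.pyRange 0 10 1))).foldl
              (fun s b => PySem.Set.add (PySem.Set.add s (a, b)) (b, a)) s)
          PySem.Set.empty)
        (PySem.Int.floordiv n 10, PySem.Int.mod n 10) := by
  rw [Bool.eq_iff_iff]
  simp only [check, PySem.Set.contains_eq_listContains, List.contains_iff_mem,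
    Bool.if_true_left, Bool.or_eq_true, Bool.and_eq_true, decide_eq_true_eq, mem_pairs,
    PySem.Set.mem_inter, PySem.Set.mem_ofList]
  tauto

theorem subset_eq_all (die1 die2 : List Int) :
    (PySem.Set.issubset (PySem.Set.ofList ([0, 1, 2, 3, 4, 5, 6, 8] : List Int))
        (PySem.Set.union
          (PySem.Set.inter (PySem.Set.ofList die1) (PySem.Set.ofList (PySem.List.pyRange 0 10 1)))
          (PySem.Set.inter (PySem.Set.ofList die2) (PySem.Set.ofList (PySem.List.pyRange 0 10 1))))) =
      (([0, 1, 2, 3, 4, 5, 6, 8] : List Int).all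
        (fun n => !(!die1.contains n && !die2.contains n))) := by
  rw [Bool.eq_iff_iff, PySem.Set.issubset_iff]
  simp only [PySem.Set.mem_union, PySem.Set.mem_inter, PySem.Set.mem_ofList,
    List.all_eq_true, Bool.not_not, Bool.not_and, Bool.or_eq_true, List.contains_iff_mem]
  constructor
  · intro h x hx
    have := h x hx
    fin_cases hx <;> tauto
  · intro h x hx
    have := h x hx
    fin_cases hx <;> simp_all

theorem check_squares_spec : Claim_equal_check_squares := by
  unfold Claim_equal_check_squares Spec_check_squares
  intro die1 die2 _
  simp only [check_squares, check_squares_alt]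
  rw [subset_eq_all]
  rcases h : ([0, 1, 2, 3, 4, 5, 6, 8] : List Int).all
      (fun n => !(!die1.contains n && !die2.contains n)) with _ | _
  · simp
  · simp only [Bool.not_true, Bool.false_eq_true, if_false, if_true]
    have hpt : ∀ n ∈ ([1, 4, 9, 16, 25, 36, 49, 64, 81] : List Int),
        check n die1 die2 =
          PySem.Set.contains
            ((PySem.Set.inter (PySem.Set.ofList die1) (PySem.Set.ofList (PySem.List.pyRange 0 10 1))).foldl
              (fun s a =>
                (PySem.Set.inter (PySem.Set.ofList die2) (PySem.Set.ofList (PySem.List.pyRange 0 10 1))).foldl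
                  (fun s b => PySem.Set.add (PySem.Set.add s (a, b)) (b, a)) s)
              PySem.Set.empty)
            (PySem.Int.floordiv n 10, PySem.Int.mod n 10) := by
      intro n hn
      exact check_eq_pairs die1 die2 n (by fin_cases hn <;> decide) (by fin_cases hn <;> decide)
    simp only [List.all_cons, List.all_nil,
      hpt 1 (by decide), hpt 4 (by decide), hpt 9 (by decide), hpt 16 (by decide),
      hpt 25 (by decide), hpt 36 (by decide), hpt 49 (by decide), hpt 64 (by decide),
      hpt 81 (by decide)]
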